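-- pv_equiv track=rewrite | github.com/lachmed/SingleMachineScheduling | Projet/src/VNSLatestVersionProblem2.py | calculerFonctionObjective
-- ===== SOURCE A (Python) =====
-- def calculerFonctionObjective(x,data):
-- #On va calculer le nombre de taches en retard pour une séquance x
-- #inistialisations
--     finnished = 0
--     T = 0
--     E = 0
--
--     res = 0
--
-- #pour chaque tache i on ajoute son pi (processing time) au temp
-- #de fin des tache qui la précède dans la séquance pour avoir ci (temp de fin)
-- # et si ce ci > di (due date) alors on incrémente le compteur des taches en retard
-- #sinon rien faire
--
--     for i in range(len(x)):
--
--         finnished += data[x[i]][0]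
--
--         if finnished>data[x[i]][1]:
--             T = 1
--             E = 0
--         elif finnished==data[x[i]][1]:
--             T= 0
--             E= 0
--         else:
--             T = 0
--             E = 1
--
--         res += (data[x[i]][2] * E) + (data[x[i]][3] * T)
--
--     return res
-- ===== SOURCE B (Python) =====
-- def calculerFonctionObjective(x, data):
--     # Pass 1: completion times (prefix sums of processing times)
--     comp = []
--     c = 0
--     for j in x:
--         c += data[j][0]
--         comp.append(c)
--     # Pass 2: penalties
--     res = 0
--     for j, c in zip(x, comp):
--         d = data[j][1]
--         if c < d:
--             res += data[j][2]
--         elif c > d: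
--             res += data[j][3]
--     return res
-- ===== Notes on version B (the rewrite author's own statement) =====
-- stated objective: alternative
-- what changed: Replaces A's single fused loop maintaining a running finish time plus 0/1 indicator variables with two passes: first a prefix-sum pass building the completion-time table, then a penalty pass over zip(x, comp) adding the earliness/tardiness cost directly per branch.
import Mathlib
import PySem

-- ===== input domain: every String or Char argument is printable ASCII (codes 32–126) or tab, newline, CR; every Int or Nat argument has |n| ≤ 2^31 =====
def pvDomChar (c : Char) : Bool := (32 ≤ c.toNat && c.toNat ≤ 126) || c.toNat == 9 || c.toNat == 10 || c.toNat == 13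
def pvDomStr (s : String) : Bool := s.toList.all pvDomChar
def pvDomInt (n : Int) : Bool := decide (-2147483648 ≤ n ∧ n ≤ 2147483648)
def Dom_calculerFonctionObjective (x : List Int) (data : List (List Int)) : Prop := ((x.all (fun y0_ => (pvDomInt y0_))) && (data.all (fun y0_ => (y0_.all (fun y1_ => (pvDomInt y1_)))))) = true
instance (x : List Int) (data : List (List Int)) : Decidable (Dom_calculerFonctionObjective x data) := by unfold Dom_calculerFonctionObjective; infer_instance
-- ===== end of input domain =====

-- ===== PORT A =====
-- B restructures A's fused penalty loop into a prefix-sum pass plus a penalty pass (objective: alternative).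
-- helper: data[j][k] with Python indexing (shared indexing primitive; exact where Pre_ holds)
def pvCell (data : List (List Int)) (j k : Int) : Int :=
  (PySem.List.pyGet? ((PySem.List.pyGet? data j).getD []) k).getD 0

-- loop body of A: state (finnished, T, E, res)
def pvStepA (data : List (List Int)) (st : Int × Int × Int × Int) (i : Int) :
    Int × Int × Int × Int :=
  let finnished := st.1 + pvCell data i 0
  let TE : Int × Int :=
    if finnished > pvCell data i 1 then (1, 0)
    else if finnished = pvCell data i 1 then (0, 0)
    else (0, 1)
  (finnished, TE.1, TE.2,
    st.2.2.2 + pvCell data i 2 * TE.2 + pvCell data i 3 * TE.1)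

def calculerFonctionObjective (x : List Int) (data : List (List Int)) : Int :=
  (x.foldl (pvStepA data) (0, 0, 0, 0)).2.2.2

-- ===== PORT B =====
-- pass 1 body: build completion-time table
def pvStepComp (data : List (List Int)) (acc : Int × List Int) (j : Int) : Int × List Int :=
  let c := acc.1 + pvCell data j 0
  (c, acc.2 ++ [c])

-- pass 2 body: penalty per (task, completion time)
def pvStepPen (data : List (List Int)) (res : Int) (jc : Int × Int) : Int :=
  let d := pvCell data jc.1 1
  if jc.2 < d then res + pvCell data jc.1 2
  else if jc.2 > d then res + pvCell data jc.1 3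
  else res

def calculerFonctionObjective_alt (x : List Int) (data : List (List Int)) : Int :=
  let comp := (x.foldl (pvStepComp data) (0, [])).2
  (x.zip comp).foldl (pvStepPen data) 0

-- ===== PRECONDITION & SPEC =====
-- Pre_ excludes exactly the inputs where A raises an IndexError: a task index out of
-- Python range of data, or a row with fewer than 4 entries.
def Pre_calculerFonctionObjective (x : List Int) (data : List (List Int)) : Prop :=
  ∀ i ∈ x, PySem.Raise.InRange data.length i ∧
    4 ≤ ((PySem.List.pyGet? data i).getD []).length
instance (x : List Int) (data : List (List Int)) :
    Decidable (Pre_calculerFonctionObjective x data) := by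
  unfold Pre_calculerFonctionObjective; infer_instance

def pvWitness_calculerFonctionObjective : List Int × List (List Int) :=
  ([0, 1, 0], [[2, 3, 5, 7], [1, 1, 4, 6]])

def Spec_calculerFonctionObjective (x : List Int) (data : List (List Int)) (out : Int) : Prop := out = calculerFonctionObjective_alt x data
instance (x : List Int) (data : List (List Int)) (out : Int) : Decidable (Spec_calculerFonctionObjective x data out) := by unfold Spec_calculerFonctionObjective; infer_instance

-- ===== CLAIM (what is proved, stated in full; the proofs are below) =====
def Claim_equal_calculerFonctionObjective : Prop := ∀ (x : List Int) (data : List (List Int)), Dom_calculerFonctionObjective x data → Pre_calculerFonctionObjective x data → Spec_calculerFonctionObjective x data (calculerFonctionObjective x data)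

-- ===== LEMMAS AND PROOFS =====
-- specification of B's first pass: the completion-time list starting from time c0
def pvComp (data : List (List Int)) (c0 : Int) : List Int → List Int
  | [] => []
  | j :: t => (c0 + pvCell data j 0) :: pvComp data (c0 + pvCell data j 0) t

theorem pvComp_fold (data : List (List Int)) :
    ∀ (x : List Int) (c0 : Int) (pre : List Int),
      (x.foldl (pvStepComp data) (c0, pre)).2 = pre ++ pvComp data c0 x := by
  intro x
  induction x with
  | nil => intro c0 pre; simp [pvComp]
  | cons j t ih =>
      intro c0 pre
      simp [List.foldl, pvStepComp, pvComp, ih]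

theorem pvMain (data : List (List Int)) :
    ∀ (x : List Int) (c0 T0 E0 r0 : Int),
      (x.foldl (pvStepA data) (c0, T0, E0, r0)).2.2.2 =
        (x.zip (pvComp data c0 x)).foldl (pvStepPen data) r0 := by
  intro x
  induction x with
  | nil => intro c0 T0 E0 r0; simp
  | cons j t ih =>
      intro c0 T0 E0 r0
      simp only [List.foldl, pvComp, List.zip_cons_cons]
      rcases lt_trichotomy (c0 + pvCell data j 0) (pvCell data j 1) with h | h | h
      · have hgt : ¬ (c0 + pvCell data j 0 > pvCell data j 1) := by omega
        have heq : ¬ (c0 + pvCell data j 0 = pvCell data j 1) := by omega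
        simp only [pvStepA, pvStepPen, if_neg hgt, if_neg heq, if_pos h]
        rw [ih]; ring_nf
      · have hgt : ¬ (c0 + pvCell data j 0 > pvCell data j 1) := by omega
        have hlt : ¬ (c0 + pvCell data j 0 < pvCell data j 1) := by omega
        simp only [pvStepA, pvStepPen, if_neg hgt, if_pos h, if_neg hlt]
        rw [ih]; ring_nf
      · have hlt : ¬ (c0 + pvCell data j 0 < pvCell data j 1) := by omega
        simp only [pvStepA, pvStepPen, if_neg hlt,
          if_pos (show c0 + pvCell data j 0 > pvCell data j 1 from h)]
        rw [ih]; ring_nf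

-- ===== VERDICT (by name: the statement is the Claim_ definition above) =====
theorem calculerFonctionObjective_spec : Claim_equal_calculerFonctionObjective := by
  intro x data _ _
  unfold Spec_calculerFonctionObjective calculerFonctionObjective calculerFonctionObjective_alt
  rw [pvComp_fold data x 0 []]
  simpa using pvMain data x 0 0 0 0
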